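-- pv_equiv track=rewrite | github.com/pradeepa1984/AI-Growth-Strategist-for-B2B-Products | backend/utils/industry_classifier.py | get_industry_list
-- ===== SOURCE A (Python) =====
-- def get_industry_list(leads: list[dict]) -> list[str]:
--     """
--     Return a sorted list of unique canonical industries present in the lead list.
--     Used to populate the ICP segment filter dropdown on the frontend.
--     "Other" is always last if present.
--     """
--     seen: set[str] = set()
--     industries: list[str] = []
--     other_present = False
--
--     for lead in leads:
--         ind = (lead.get("canonical_industry") or lead.get("industry") or "Other").strip()
--         if ind == "Other":
--             other_present = True
--         elif ind not in seen:
--             seen.add(ind)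
--             industries.append(ind)
--
--     industries.sort()
--     if other_present:
--         industries.append("Other")
--     return industries
-- ===== SOURCE B (Python) =====
-- def get_industry_list(leads: list[dict]) -> list[str]:
--     # Different strategy: no set at all. Sort every extracted value (duplicates
--     # included) first, then make one scan that drops "Other" and adjacent
--     # duplicates; append "Other" at the end if it occurred anywhere.
--     vals = sorted((lead.get("canonical_industry") or lead.get("industry") or "Other").strip()
--                   for lead in leads)
--     out: list[str] = []
--     prev = None
--     for v in vals:
--         if v != "Other" and v != prev:
--             out.append(v)
--         prev = v
--     if "Other" in vals:
--         out.append("Other")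
--     return out
-- ===== Notes on version B (the rewrite author's own statement) =====
-- stated objective: alternative
-- what changed: A dedups during collection with a seen-set plus an output list and an other_present flag and sorts the unique values afterwards; B uses no set: it sorts all extracted values (duplicates included) first, then one linear scan removes 'Other' and adjacent duplicates, appending 'Other' iff it occurs in the sorted list.
import Mathlib
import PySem

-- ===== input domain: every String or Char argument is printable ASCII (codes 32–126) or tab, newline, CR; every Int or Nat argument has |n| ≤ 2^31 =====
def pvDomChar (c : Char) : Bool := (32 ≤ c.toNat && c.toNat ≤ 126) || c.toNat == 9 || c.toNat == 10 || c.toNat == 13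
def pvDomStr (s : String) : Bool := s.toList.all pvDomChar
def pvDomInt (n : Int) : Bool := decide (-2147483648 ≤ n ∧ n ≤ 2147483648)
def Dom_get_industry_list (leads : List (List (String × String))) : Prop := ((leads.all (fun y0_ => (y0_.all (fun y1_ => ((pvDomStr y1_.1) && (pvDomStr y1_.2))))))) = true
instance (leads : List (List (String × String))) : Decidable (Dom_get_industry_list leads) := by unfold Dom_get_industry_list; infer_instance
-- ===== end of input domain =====

-- B uses no seen-set: it sorts ALL extracted values (duplicates included) first, then one
-- scan drops "Other" and adjacent duplicates, appending "Other" iff it occurs; objective: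
-- alternative. Equal return value on every input (A is total).

-- shared helper: the industry expression, identical in both Pythons:
-- (lead.get("canonical_industry") or lead.get("industry") or "Other").strip()
def pvInd (lead : List (String × String)) : String :=
  let c := (PySem.Dict.get? (PySem.Dict.mk lead) "canonical_industry").getD ""
  let i := (PySem.Dict.get? (PySem.Dict.mk lead) "industry").getD ""
  PySem.Str.strip (if c ≠ "" then c else if i ≠ "" then i else "Other")

-- ===== PORT A =====
def get_industry_list (leads : List (List (String × String))) : List String :=
  let st := leads.foldl
    (fun (s : PySem.Set String × List String × Bool) lead =>
      let ind := pvInd lead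
      if ind = "Other" then (s.1, s.2.1, true)
      else if PySem.Set.contains s.1 ind then s
      else (PySem.Set.add s.1 ind, s.2.1 ++ [ind], s.2.2))
    (PySem.Set.empty, [], false)
  let industries := PySem.List.sorted st.2.1 (fun x => x) false
  if st.2.2 then industries ++ ["Other"] else industries

-- ===== PORT B =====
-- vals = sorted(all values); then one scan with prev (None at start) dropping "Other"
-- and adjacent duplicates; "Other" appended iff it is in vals.
def get_industry_list_alt (leads : List (List (String × String))) : List String :=
  let vals := PySem.List.sorted (leads.map pvInd) (fun x => x) false
  let st := vals.foldl
    (fun (s : List String × Option String) v =>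
      ((if v ≠ "Other" ∧ some v ≠ s.2 then s.1 ++ [v] else s.1), some v))
    ([], none)
  if vals.contains "Other" then st.1 ++ ["Other"] else st.1

-- ===== PRECONDITION & SPEC =====
def Spec_get_industry_list (leads : List (List (String × String))) (out : List String) : Prop := out = get_industry_list_alt leads
instance (leads : List (List (String × String))) (out : List String) : Decidable (Spec_get_industry_list leads out) := by unfold Spec_get_industry_list; infer_instance

-- ===== CLAIM (what is proved, stated in full; the proofs are below) =====
def Claim_equal_get_industry_list : Prop := ∀ (leads : List (List (String × String))), Dom_get_industry_list leads → Spec_get_industry_list leads (get_industry_list leads)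

-- ===== LEMMAS AND PROOFS =====

-- functional form of B's scan: drop "Other" and values equal to the previous value
def dedupA : Option String → List String → List String
  | _, [] => []
  | prev, v :: t => if v ≠ "Other" ∧ some v ≠ prev then v :: dedupA (some v) t else dedupA (some v) t

lemma foldB (vs : List String) :
    ∀ (acc : List String) (prev : Option String),
      (vs.foldl
        (fun (s : List String × Option String) v =>
          ((if v ≠ "Other" ∧ some v ≠ s.2 then s.1 ++ [v] else s.1), some v))
        (acc, prev)).1 = acc ++ dedupA prev vs := by
  induction vs with
  | nil => intro acc prev; simp [dedupA]
  | cons v t ih =>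
    intro acc prev
    rw [List.foldl_cons]
    simp only [dedupA]
    by_cases h : v ≠ "Other" ∧ some v ≠ prev
    · rw [if_pos h, if_pos h, ih (acc ++ [v]) (some v)]; simp
    · rw [if_neg h, if_neg h, ih acc (some v)]

lemma mem_dedupA (vs : List String) :
    ∀ (prev : Option String), vs.Pairwise (fun a b => a ≤ b) →
      (∀ y ∈ vs, ∀ p, prev = some p → p ≤ y) →
      ∀ x, x ∈ dedupA prev vs ↔ x ∈ vs ∧ x ≠ "Other" ∧ some x ≠ prev := by
  induction vs with
  | nil => intro prev _ _ x; simp [dedupA]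
  | cons v t ih =>
    intro prev hpw hlb x
    rcases List.pairwise_cons.mp hpw with ⟨hv, ht⟩
    have hlb' : ∀ y ∈ t, ∀ p, (some v : Option String) = some p → p ≤ y := by
      intro y hy p hp; cases hp; exact hv y hy
    have iht := ih (some v) ht hlb' x
    by_cases h : v ≠ "Other" ∧ some v ≠ prev
    · simp only [dedupA, if_pos h, List.mem_cons, iht]
      constructor
      · rintro (rfl | ⟨hxt, hxo, hxv⟩)
        · exact ⟨Or.inl rfl, h.1, h.2⟩
        · refine ⟨Or.inr hxt, hxo, ?_⟩
          intro hc
          rcases prev with _ | p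
          · exact absurd hc (by simp)
          · have hpx : p = x := (Option.some.inj hc).symm
            have h1 : p ≤ v := hlb v (List.mem_cons_self ..) p rfl
            have h2 : v ≤ x := hv x hxt
            have : x = v := le_antisymm (hpx ▸ h1) h2
            exact (by simp [this] at hxv)
      · rintro ⟨hmem, hxo, hxp⟩
        rcases hmem with rfl | hxt
        · exact Or.inl rfl
        · by_cases hxv : x = v
          · exact Or.inl hxv
          · exact Or.inr ⟨hxt, hxo, by simpa using hxv⟩
    · simp only [dedupA, if_neg h, iht, List.mem_cons]
      rcases not_and_or.mp h with h1 | h2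
      · -- v = "Other"
        have hvO : v = "Other" := not_not.mp h1
        constructor
        · rintro ⟨hxt, hxo, hxv⟩
          refine ⟨Or.inr hxt, hxo, ?_⟩
          intro hc
          rcases prev with _ | p
          · exact absurd hc (by simp)
          · have hpx : p = x := (Option.some.inj hc).symm
            have h1' : p ≤ v := hlb v (List.mem_cons_self ..) p rfl
            have h2' : v ≤ x := hv x hxt
            have : x = v := le_antisymm (hpx ▸ h1') h2'
            exact hxo (this.trans hvO)
        · rintro ⟨hmem, hxo, hxp⟩
          rcases hmem with rfl | hxt
          · exact absurd hvO hxo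
          · exact ⟨hxt, hxo, by simpa [hvO] using hxo⟩
      · -- prev = some v
        have hpv : prev = some v := (not_not.mp h2).symm
        constructor
        · rintro ⟨hxt, hxo, hxv⟩
          exact ⟨Or.inr hxt, hxo, by rw [hpv]; exact hxv⟩
        · rintro ⟨hmem, hxo, hxp⟩
          rw [hpv] at hxp
          rcases hmem with rfl | hxt
          · exact (hxp rfl).elim
          · exact ⟨hxt, hxo, hxp⟩

lemma pairwise_dedupA (vs : List String) :
    ∀ (prev : Option String), vs.Pairwise (fun a b => a ≤ b) →
      (∀ y ∈ vs, ∀ p, prev = some p → p ≤ y) →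
      (dedupA prev vs).Pairwise (fun a b => a < b) := by
  induction vs with
  | nil => intro prev _ _; simp [dedupA]
  | cons v t ih =>
    intro prev hpw hlb
    rcases List.pairwise_cons.mp hpw with ⟨hv, ht⟩
    have hlb' : ∀ y ∈ t, ∀ p, (some v : Option String) = some p → p ≤ y := by
      intro y hy p hp; cases hp; exact hv y hy
    have ihr := ih (some v) ht hlb'
    by_cases h : v ≠ "Other" ∧ some v ≠ prev
    · simp only [dedupA, if_pos h]
      refine List.pairwise_cons.mpr ⟨?_, ihr⟩
      intro b hb
      rcases (mem_dedupA t (some v) ht hlb' b).mp hb with ⟨hbt, _, hbv⟩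
      have : v ≤ b := hv b hbt
      exact lt_of_le_of_ne this (fun he => hbv (by simp [he]))
    · simpa only [dedupA, if_neg h] using ihr

-- characterisation of A's loop: seen and industries coincide, the flag records "Other"
lemma foldA (leads : List (List (String × String))) :
    ∀ (S : List String) (b : Bool),
      leads.foldl
        (fun (s : PySem.Set String × List String × Bool) lead =>
          let ind := pvInd lead
          if ind = "Other" then (s.1, s.2.1, true)
          else if PySem.Set.contains s.1 ind then s
          else (PySem.Set.add s.1 ind, s.2.1 ++ [ind], s.2.2)) (S, S, b)
      = (((leads.map pvInd).filter (fun x => !(x == "Other"))).foldl PySem.Set.add S,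
         ((leads.map pvInd).filter (fun x => !(x == "Other"))).foldl PySem.Set.add S,
         b || (leads.map pvInd).any (fun x => x == "Other")) := by
  induction leads with
  | nil => intro S b; simp
  | cons hd t ih =>
    intro S b
    rw [List.foldl_cons]
    by_cases h : pvInd hd = "Other"
    · have hstep :
        (let ind := pvInd hd;
         if ind = "Other" then ((S : PySem.Set String), S, true)
         else if PySem.Set.contains S ind then ((S : PySem.Set String), S, b)
         else (PySem.Set.add S ind, S ++ [ind], b)) = (S, S, true) := by
        simp [h]
      rw [hstep, ih S true]
      simp [h]
    · have hbeq : (pvInd hd == "Other") = false := by simpa using h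
      by_cases hc : PySem.Set.contains S (pvInd hd) = true
      · have hstep :
          (let ind := pvInd hd;
           if ind = "Other" then ((S : PySem.Set String), S, true)
           else if PySem.Set.contains S ind then ((S : PySem.Set String), S, b)
           else (PySem.Set.add S ind, S ++ [ind], b)) = (S, S, b) := by
          simp [h]
          simpa [PySem.Set.contains] using hc
        have hadd : PySem.Set.add S (pvInd hd) = S := by
          simp [PySem.Set.add]
          simpa [PySem.Set.contains] using hc
        rw [hstep, ih S b]
        simp [hadd, hbeq, List.foldl_cons]
      · have hstep :
          (let ind := pvInd hd;
           if ind = "Other" then ((S : PySem.Set String), S, true)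
           else if PySem.Set.contains S ind then ((S : PySem.Set String), S, b)
           else (PySem.Set.add S ind, S ++ [ind], b)) = (S ++ [pvInd hd], S ++ [pvInd hd], b) := by
          have hadd : PySem.Set.add S (pvInd hd) = S ++ [pvInd hd] := by
            simp only [PySem.Set.add, hc, if_neg, Bool.false_eq_true, not_false_iff]
          simp [h, hadd]
          simpa [PySem.Set.contains] using hc
        have hadd : PySem.Set.add S (pvInd hd) = S ++ [pvInd hd] := by
          simp only [PySem.Set.add, hc, if_neg, Bool.false_eq_true, not_false_iff]
        rw [hstep, ih (S ++ [pvInd hd]) b]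
        simp [hbeq, hadd, List.foldl_cons]

-- the main equality
lemma main_eq (leads : List (List (String × String))) :
    get_industry_list leads = get_industry_list_alt leads := by
  set l := leads.map pvInd with hl
  set lNO := l.filter (fun x => !(x == "Other")) with hlNO
  set T : List String := PySem.Set.ofList lNO with hT
  have hA : get_industry_list leads =
      (if l.any (fun x => x == "Other")
       then PySem.List.sorted T (fun x => x) false ++ ["Other"]
       else PySem.List.sorted T (fun x => x) false) := by
    have h0 : (PySem.Set.empty : PySem.Set String) = ([] : List String) := rfl
    simp only [get_industry_list, h0]
    rw [foldA leads ([] : List String) false]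
    rw [hT, PySem.Set.ofList_eq_foldl, hlNO, hl]
    simp
  set vals := PySem.List.sorted l (fun x => x) false with hvals
  have hvpw : vals.Pairwise (fun a b => a ≤ b) := by
    simpa using PySem.List.sorted_pairwise l (fun x => x)
  have hlbnone : ∀ y ∈ vals, ∀ p, (none : Option String) = some p → p ≤ y := by
    intro y _ p hp; exact absurd hp (by simp)
  set D := dedupA none vals with hD
  have hB : get_industry_list_alt leads =
      (if vals.contains "Other" then D ++ ["Other"] else D) := by
    simp only [get_industry_list_alt, ← hl, ← hvals]
    rw [foldB vals [] none]
    simp [hD]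
  have hDmem : ∀ x, x ∈ D ↔ x ∈ l ∧ x ≠ "Other" := by
    intro x
    rw [hD, mem_dedupA vals none hvpw hlbnone x]
    constructor
    · rintro ⟨h1, h2, _⟩
      exact ⟨(PySem.List.mem_sorted l _ false x).mp h1, h2⟩
    · rintro ⟨h1, h2⟩
      exact ⟨(PySem.List.mem_sorted l _ false x).mpr h1, h2, by simp⟩
  have hDpw : D.Pairwise (fun a b => a < b) := pairwise_dedupA vals none hvpw hlbnone
  have hDnd : D.Nodup := hDpw.imp (fun h => ne_of_lt h)
  have hDperm : D.Perm T := by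
    refine (List.perm_ext_iff_of_nodup hDnd (PySem.Set.nodup_ofList lNO)).mpr ?_
    intro x
    rw [hDmem x, PySem.Set.mem_ofList, List.mem_filter]
    simp
  have hsortT : PySem.List.sorted T (fun x => x) false = D :=
    PySem.List.sorted_eq_of_perm_of_pairwise_lt T D (fun x => x) hDperm hDpw
  have hcond : vals.contains "Other" = l.any (fun x => x == "Other") := by
    by_cases h : "Other" ∈ l
    · have h1 : vals.contains "Other" = true := by
        simp
        exact (PySem.List.mem_sorted l _ false "Other").mpr h
      have h2 : l.any (fun x => x == "Other") = true :=
        List.any_eq_true.mpr ⟨"Other", h, by simp⟩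
      rw [h1, h2]
    · have h1 : vals.contains "Other" = false := by
        simp
        intro hc
        exact h ((PySem.List.mem_sorted l _ false "Other").mp hc)
      have h2 : l.any (fun x => x == "Other") = false := by
        simp only [List.any_eq_false]
        intro x hx
        simp only [beq_iff_eq]
        exact fun he => h (he ▸ hx)
      rw [h1, h2]
  rw [hA, hB, hsortT, hcond]

-- ===== VERDICT (by name: the statement is the Claim_ definition above) =====
theorem get_industry_list_spec : Claim_equal_get_industry_list := by
  intro leads _
  unfold Spec_get_industry_list
  exact main_eq leads
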